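-- pv_equiv track=rewrite | github.com/ssisyphuss/Algorithm_solve | BJ/1244_스위치켜고끄기/1244_스위치켜고끄기.py | switch_girl
-- ===== SOURCE A (Python) =====
-- def switch_girl(switches, num):
--     i = 0
--     while num+i < len(switches) and num-i >= 1:
--         if switches[num+i] == switches[num-i]:
--             switches[num+i], switches[num-i]  = 1 - switches[num+i], 1 - switches[num-i]
--             i += 1
--         else:
--             break
--
--     return switches
-- ===== SOURCE B (Python) =====
-- def switch_girl(switches, num):
--     # Scan for the first mismatching symmetric pair to get radius r, then rebuild
--     # the list in one comprehension toggling exactly the interval [num-r+1, num+r-1].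
--     n = len(switches)
--     r = 0
--     for j in range(min(n - num, num)):
--         if switches[num + j] != switches[num - j]:
--             break
--         r += 1
--     switches[:] = [1 - v if num - r + 1 <= k <= num + r - 1 else v
--                    for k, v in enumerate(switches)]
--     return switches
-- ===== Notes on version B (the rewrite author's own statement) =====
-- stated objective: alternative
-- what changed: Replaces A's interleaved mutate-while-scanning loop by a bounded read-only scan over range(min(n-num, num)) that finds the toggle radius r, then rebuilds the list in a single enumerate comprehension toggling exactly the contiguous interval [num-r+1, num+r-1]; sound because the toggled pairs are disjoint and their union is that interval.
import Mathlib
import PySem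

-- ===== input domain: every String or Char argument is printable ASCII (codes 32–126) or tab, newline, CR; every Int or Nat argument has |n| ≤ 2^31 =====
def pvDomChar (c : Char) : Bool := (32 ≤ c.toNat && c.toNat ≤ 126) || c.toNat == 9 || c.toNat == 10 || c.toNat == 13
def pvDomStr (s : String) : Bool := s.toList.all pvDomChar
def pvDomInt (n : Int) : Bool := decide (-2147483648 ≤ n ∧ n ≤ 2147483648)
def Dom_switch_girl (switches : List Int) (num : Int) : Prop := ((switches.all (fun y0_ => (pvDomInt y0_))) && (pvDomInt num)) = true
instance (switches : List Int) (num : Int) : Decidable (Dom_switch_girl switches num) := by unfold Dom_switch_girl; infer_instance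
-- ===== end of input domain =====

-- B replaces A's interleaved mutate-while-scanning loop by a bounded read-only scan for the
-- radius r followed by rebuilding the whole list in one comprehension that toggles exactly
-- the interval [num-r+1, num+r-1] (alternative decomposition, same cost); both Pythons
-- mutate the argument list in place, the equivalence proved here is about the return value.

-- ===== PORT A =====
-- A's while loop; the tuple assignment writes num+i first, then num-i (Python order).
-- pyGetD/pySetD defaults are never used (the guard proves both indices in range), and the
-- fuel only makes the recursion structural: len+1 exceeds the possible iteration count,
-- since every executed iteration needs 0 ≤ i < len - num ≤ len - 1.
def switch_girl_loop (fuel : Nat) (xs : List Int) (num i : Int) : List Int :=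
  match fuel with
  | 0 => xs
  | fuel + 1 =>
    if num + i < (xs.length : Int) ∧ 1 ≤ num - i then
      if PySem.List.pyGetD xs (num + i) 0 = PySem.List.pyGetD xs (num - i) 0 then
        switch_girl_loop fuel
          (PySem.List.pySetD (PySem.List.pySetD xs (num + i) (1 - PySem.List.pyGetD xs (num + i) 0))
            (num - i) (1 - PySem.List.pyGetD xs (num - i) 0)) num (i + 1)
      else xs
    else xs

def switch_girl (switches : List Int) (num : Int) : List Int :=
  switch_girl_loop (switches.length + 1) switches num 0

-- ===== PORT B =====
-- B's 'for j in range(min(n - num, num)): if mismatch: break; r += 1' — structural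
-- recursion over the range list, accumulating r.
def switch_girl_alt_scan (xs : List Int) (num : Int) : List Int → Int → Int
  | [], r => r
  | j :: rest, r =>
    if PySem.List.pyGetD xs (num + j) 0 ≠ PySem.List.pyGetD xs (num - j) 0 then r
    else switch_girl_alt_scan xs num rest (r + 1)

-- B's comprehension '[1 - v if num-r+1 <= k <= num+r-1 else v for k, v in enumerate(switches)]'
def switch_girl_alt (switches : List Int) (num : Int) : List Int :=
  let n : Int := switches.length
  let r := switch_girl_alt_scan switches num (PySem.List.pyRange 0 (min (n - num) num) 1) 0
  (PySem.List.enumerate switches).map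
    (fun kv => if num - r + 1 ≤ kv.1 ∧ kv.1 ≤ num + r - 1 then 1 - kv.2 else kv.2)

-- ===== PRECONDITION & SPEC =====
def Spec_switch_girl (switches : List Int) (num : Int) (out : List Int) : Prop := out = switch_girl_alt switches num
instance (switches : List Int) (num : Int) (out : List Int) : Decidable (Spec_switch_girl switches num out) := by unfold Spec_switch_girl; infer_instance

-- ===== CLAIM (what is proved, stated in full; the proofs are below) =====
def Claim_equal_switch_girl : Prop := ∀ (switches : List Int) (num : Int), Dom_switch_girl switches num → Spec_switch_girl switches num (switch_girl switches num)

-- ===== LEMMAS AND PROOFS =====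

-- proof-side helpers: A's loop rephrased as a radius scan plus a fold of pair toggles
def switch_girl_scan (fuel : Nat) (xs : List Int) (num r : Int) : Int :=
  match fuel with
  | 0 => r
  | fuel + 1 =>
    if num + r < (xs.length : Int) ∧ 1 ≤ num - r ∧
        PySem.List.pyGetD xs (num + r) 0 = PySem.List.pyGetD xs (num - r) 0 then
      switch_girl_scan fuel xs num (r + 1)
    else r

def switch_girl_step (num : Int) (acc : List Int) (j : Int) : List Int :=
  PySem.List.pySetD (PySem.List.pySetD acc (num + j) (1 - PySem.List.pyGetD acc (num + j) 0))
    (num - j) (1 - PySem.List.pyGetD acc (num - j) 0)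

-- the starting value is a lower bound for the scan result
theorem scan_ge (xs : List Int) (num : Int) : ∀ (fuel : Nat) (r : Int),
    r ≤ switch_girl_scan fuel xs num r := by
  intro fuel
  induction fuel with
  | zero => intro r; exact le_rfl
  | succ fuel ih =>
    intro r
    rw [switch_girl_scan]
    split
    · have := ih (r + 1); omega
    · exact le_rfl

-- the scan result never exceeds max r (min (n - num) num)
theorem scan_le (xs : List Int) (num : Int) : ∀ (fuel : Nat) (r : Int),
    switch_girl_scan fuel xs num r ≤ max r (min ((xs.length : Int) - num) num) := by
  intro fuel
  induction fuel with
  | zero => intro r; exact le_max_left _ _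
  | succ fuel ih =>
    intro r
    rw [switch_girl_scan]
    split
    · next h => have := ih (r + 1); omega
    · exact le_max_left _ _

-- reading an unset position of a single-cell update
theorem getD_setD_ne (xs : List Int) (p q v : Int) (hp : 0 ≤ p) (hq0 : 0 ≤ q)
    (hq : q < (xs.length : Int)) (hne : p ≠ q) :
    PySem.List.pyGetD (PySem.List.pySetD xs p v) q 0 = PySem.List.pyGetD xs q 0 := by
  rw [PySem.List.pySetD_of_nonneg _ _ hp,
    PySem.List.pyGetD_eq_getElem _ _ hq0 (by simpa using hq),
    PySem.List.pyGetD_eq_getElem _ _ hq0 hq,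
    List.getElem_set_ne (by omega)]

-- the scan only reads positions num±j for j ≥ r; lists agreeing there scan alike
theorem scan_congr (num : Int) : ∀ (fuel : Nat) (xs ys : List Int) (r : Int),
    xs.length = ys.length →
    (∀ j : Int, r ≤ j → num + j < (xs.length : Int) → 1 ≤ num - j →
      PySem.List.pyGetD xs (num + j) 0 = PySem.List.pyGetD ys (num + j) 0 ∧
      PySem.List.pyGetD xs (num - j) 0 = PySem.List.pyGetD ys (num - j) 0) →
    switch_girl_scan fuel xs num r = switch_girl_scan fuel ys num r := by
  intro fuel
  induction fuel with
  | zero => intro xs ys r _ _; rfl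
  | succ fuel ih =>
    intro xs ys r hlen hagree
    have hlen' : (xs.length : Int) = (ys.length : Int) := by exact_mod_cast hlen
    rw [switch_girl_scan, switch_girl_scan]
    by_cases hb : num + r < (xs.length : Int) ∧ 1 ≤ num - r
    · obtain ⟨he1, he2⟩ := hagree r le_rfl hb.1 hb.2
      by_cases heq : PySem.List.pyGetD xs (num + r) 0 = PySem.List.pyGetD xs (num - r) 0
      · rw [if_pos ⟨hb.1, hb.2, heq⟩,
          if_pos ⟨by omega, hb.2, by rw [← he1, ← he2]; exact heq⟩]
        exact ih xs ys (r + 1) hlen (fun j hj => hagree j (by omega))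
      · rw [if_neg (fun hc => heq hc.2.2),
          if_neg (fun hc : _ ∧ _ ∧ _ => heq (by rw [he1, he2]; exact hc.2.2))]
    · rw [if_neg (fun hc : _ ∧ _ ∧ _ => hb ⟨hc.1, hc.2.1⟩),
        if_neg (fun hc : _ ∧ _ ∧ _ => hb ⟨by omega, hc.2.1⟩)]

-- toggling the pair at radius i does not change the positions the scan still reads
theorem step_preserves (xs : List Int) (num i j : Int) (hi : 0 ≤ i) (hj : i + 1 ≤ j)
    (hjb : num + j < (xs.length : Int)) (hjl : 1 ≤ num - j)
    (_hib : num + i < (xs.length : Int)) (hil : 1 ≤ num - i) :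
    PySem.List.pyGetD (switch_girl_step num xs i) (num + j) 0 = PySem.List.pyGetD xs (num + j) 0 ∧
    PySem.List.pyGetD (switch_girl_step num xs i) (num - j) 0 = PySem.List.pyGetD xs (num - j) 0 := by
  unfold switch_girl_step
  refine ⟨?_, ?_⟩
  · rw [getD_setD_ne _ _ _ _ (by omega) (by omega)
        (by simp only [PySem.List.length_pySetD]; omega) (by omega),
      getD_setD_ne _ _ _ _ (by omega) (by omega) (by omega) (by omega)]
  · rw [getD_setD_ne _ _ _ _ (by omega) (by omega)
        (by simp only [PySem.List.length_pySetD]; omega) (by omega),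
      getD_setD_ne _ _ _ _ (by omega) (by omega) (by omega) (by omega)]

theorem length_step (xs : List Int) (num i : Int) :
    (switch_girl_step num xs i).length = xs.length := by
  simp only [switch_girl_step, PySem.List.length_pySetD]

-- A's loop from i equals the deferred toggle pass over [i, scan) (same fuel on both sides)
theorem loop_eq_foldl (num : Int) : ∀ (fuel : Nat) (xs : List Int) (i : Int), 0 ≤ i →
    switch_girl_loop fuel xs num i =
      (PySem.List.pyRange i (switch_girl_scan fuel xs num i) 1).foldl (switch_girl_step num) xs := by
  intro fuel
  induction fuel with
  | zero =>
    intro xs i _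
    rw [switch_girl_loop, switch_girl_scan, PySem.List.pyRange_one_eq_nil le_rfl]
    rfl
  | succ fuel ih =>
    intro xs i hi
    rw [switch_girl_loop]
    by_cases hb : num + i < (xs.length : Int) ∧ 1 ≤ num - i
    · rw [if_pos hb]
      by_cases heq : PySem.List.pyGetD xs (num + i) 0 = PySem.List.pyGetD xs (num - i) 0
      · rw [if_pos heq]
        have hscan : switch_girl_scan (fuel + 1) xs num i = switch_girl_scan fuel xs num (i + 1) := by
          rw [switch_girl_scan]; rw [if_pos ⟨hb.1, hb.2, heq⟩]
        have htx : PySem.List.pySetD (PySem.List.pySetD xs (num + i)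
            (1 - PySem.List.pyGetD xs (num + i) 0)) (num - i)
            (1 - PySem.List.pyGetD xs (num - i) 0) = switch_girl_step num xs i := rfl
        rw [htx]
        have hlen := length_step xs num i
        have hsc2 : switch_girl_scan fuel (switch_girl_step num xs i) num (i + 1) =
            switch_girl_scan fuel xs num (i + 1) := by
          apply scan_congr num fuel _ xs (i + 1) hlen
          intro j hj hjb hjl
          rw [hlen] at hjb
          exact step_preserves xs num i j hi hj hjb hjl hb.1 hb.2
        have hge : i + 1 ≤ switch_girl_scan fuel xs num (i + 1) := scan_ge xs num fuel (i + 1)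
        rw [hscan,
          PySem.List.pyRange_one_cons (show i < switch_girl_scan fuel xs num (i + 1) by omega),
          List.foldl_cons, ih (switch_girl_step num xs i) (i + 1) (by omega), hsc2]
      · rw [if_neg heq]
        have : switch_girl_scan (fuel + 1) xs num i = i := by
          rw [switch_girl_scan]; rw [if_neg (fun hc => heq hc.2.2)]
        rw [this, PySem.List.pyRange_one_eq_nil le_rfl]
        rfl
    · rw [if_neg hb]
      have : switch_girl_scan (fuel + 1) xs num i = i := by
        rw [switch_girl_scan]; rw [if_neg (fun hc : _ ∧ _ ∧ _ => hb ⟨hc.1, hc.2.1⟩)]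
      rw [this, PySem.List.pyRange_one_eq_nil le_rfl]
      rfl

-- A's fueled scan computes the same radius as B's scan over the bounded range list
theorem scan_eq_alt_scan (xs : List Int) (num : Int) : ∀ (fuel : Nat) (r : Int),
    (min ((xs.length : Int) - num) num - r).toNat < fuel →
    switch_girl_scan fuel xs num r =
      switch_girl_alt_scan xs num
        (PySem.List.pyRange r (min ((xs.length : Int) - num) num) 1) r := by
  intro fuel
  induction fuel with
  | zero => intro r h; omega
  | succ fuel ih =>
    intro r hf
    rw [switch_girl_scan]
    by_cases hlt : r < min ((xs.length : Int) - num) num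
    · rw [PySem.List.pyRange_one_cons hlt, switch_girl_alt_scan]
      by_cases heq : PySem.List.pyGetD xs (num + r) 0 = PySem.List.pyGetD xs (num - r) 0
      · rw [if_pos ⟨by omega, by omega, heq⟩, if_neg (by simpa using heq)]
        exact ih (r + 1) (by omega)
      · rw [if_neg (fun hc => heq hc.2.2), if_pos (by simpa using heq)]
    · rw [if_neg (fun hc : _ ∧ _ ∧ _ => hlt (by omega)),
        PySem.List.pyRange_one_eq_nil (by omega), switch_girl_alt_scan]

-- one pair toggle, read at an arbitrary index
theorem step_getElem (xs : List Int) (num i : Int) (k : Nat) (hk : k < xs.length)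
    (hi : 0 ≤ i) (hib : num + i < (xs.length : Int)) (hil : 1 ≤ num - i) :
    (switch_girl_step num xs i)[k]'(by rw [length_step]; exact hk) =
      if (k : Int) = num + i ∨ (k : Int) = num - i then 1 - xs[k] else xs[k] := by
  unfold switch_girl_step
  simp only [PySem.List.pySetD_of_nonneg _ _ (by omega : (0:Int) ≤ num - i),
    PySem.List.pySetD_of_nonneg _ _ (by omega : (0:Int) ≤ num + i),
    PySem.List.pyGetD_eq_getElem _ _ (by omega : (0:Int) ≤ num + i) hib,
    PySem.List.pyGetD_eq_getElem _ _ (by omega : (0:Int) ≤ num - i)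
      (by omega : num - i < (xs.length : Int)),
    List.getElem_set]
  split_ifs <;> (try subst_vars) <;> first | rfl | omega

-- the fold of pair toggles over [i, R) rebuilds the list with two toggled intervals
theorem foldl_toggle (num R : Int) : ∀ (fuelN : Nat) (xs : List Int) (i : Int), 0 ≤ i →
    (R - i).toNat ≤ fuelN →
    (∀ j : Int, i ≤ j → j < R → num + j < (xs.length : Int) ∧ 1 ≤ num - j) →
    (PySem.List.pyRange i R 1).foldl (switch_girl_step num) xs =
      (PySem.List.enumerate xs).map
        (fun kv => if (num + i ≤ kv.1 ∧ kv.1 ≤ num + R - 1) ∨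
            (num - R + 1 ≤ kv.1 ∧ kv.1 ≤ num - i) then 1 - kv.2 else kv.2) := by
  intro fuelN
  induction fuelN with
  | zero =>
    intro xs i hi hf _
    rw [PySem.List.pyRange_one_eq_nil (by omega), List.foldl_nil]
    have : ∀ kv ∈ PySem.List.enumerate xs 0,
        (if (num + i ≤ kv.1 ∧ kv.1 ≤ num + R - 1) ∨
            (num - R + 1 ≤ kv.1 ∧ kv.1 ≤ num - i) then 1 - kv.2 else kv.2) = kv.2 := by
      intro kv _
      rw [if_neg]; rintro (⟨h1, h2⟩ | ⟨h1, h2⟩) <;> omega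
    rw [List.map_congr_left this, PySem.List.map_snd_enumerate]
  | succ fuelN ih =>
    intro xs i hi hf hbound
    by_cases hiR : i < R
    · rw [PySem.List.pyRange_one_cons hiR, List.foldl_cons]
      obtain ⟨hib, hil⟩ := hbound i le_rfl hiR
      have hlen := length_step xs num i
      rw [ih (switch_girl_step num xs i) (i + 1) (by omega) (by omega)
          (fun j hj hjR => by rw [hlen]; exact hbound j (by omega) hjR)]
      apply List.ext_getElem
      · simp [PySem.List.length_enumerate, hlen]
      · intro k hk1 hk2
        have hkx : k < xs.length := by
          simpa [PySem.List.length_enumerate, hlen] using hk1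
        simp only [List.getElem_map, PySem.List.getElem_enumerate, zero_add]
        rw [step_getElem xs num i k hkx hi hib hil]
        split_ifs <;> first | rfl | omega
    · rw [PySem.List.pyRange_one_eq_nil (by omega), List.foldl_nil]
      have : ∀ kv ∈ PySem.List.enumerate xs 0,
          (if (num + i ≤ kv.1 ∧ kv.1 ≤ num + R - 1) ∨
              (num - R + 1 ≤ kv.1 ∧ kv.1 ≤ num - i) then 1 - kv.2 else kv.2) = kv.2 := by
        intro kv _
        rw [if_neg]; rintro (⟨h1, h2⟩ | ⟨h1, h2⟩) <;> omega
      rw [List.map_congr_left this, PySem.List.map_snd_enumerate]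

-- ===== VERDICT (by name: the statement is the Claim_ definition above) =====
theorem switch_girl_spec : Claim_equal_switch_girl := by
  intro switches num _
  unfold Spec_switch_girl switch_girl switch_girl_alt
  show switch_girl_loop (switches.length + 1) switches num 0 =
    (PySem.List.enumerate switches).map
      (fun kv => if num - (switch_girl_alt_scan switches num
            (PySem.List.pyRange 0 (min ((switches.length : Int) - num) num) 1) 0) + 1 ≤ kv.1 ∧
          kv.1 ≤ num + (switch_girl_alt_scan switches num
            (PySem.List.pyRange 0 (min ((switches.length : Int) - num) num) 1) 0) - 1
        then 1 - kv.2 else kv.2)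
  rw [← scan_eq_alt_scan switches num (switches.length + 1) 0 (by omega)]
  have h0R : 0 ≤ switch_girl_scan (switches.length + 1) switches num 0 :=
    scan_ge switches num _ 0
  have hRm : switch_girl_scan (switches.length + 1) switches num 0 ≤
      max 0 (min ((switches.length : Int) - num) num) := scan_le switches num _ 0
  rw [loop_eq_foldl num (switches.length + 1) switches 0 le_rfl]
  rw [foldl_toggle num (switch_girl_scan (switches.length + 1) switches num 0)
      ((switch_girl_scan (switches.length + 1) switches num 0).toNat) switches 0 le_rfl
      (by omega) (fun j hj hjR => by constructor <;> omega)]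
  apply List.map_congr_left
  intro kv _
  split_ifs <;> first | rfl | omega
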